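-- pv_equiv track=rewrite | github.com/faelsete/MagicVoice | text_splitter.py | _is_number_or_abbrev
-- ===== SOURCE A (Python) =====
-- def _is_number_or_abbrev(text: str, dot_pos: int) -> bool:
--     """Verifica se o ponto é parte de um número decimal ou abreviação"""
--     # Verifica número decimal (ex: 25.99)
--     if dot_pos > 0 and text[dot_pos - 1].isdigit():
--         if dot_pos + 1 < len(text) and text[dot_pos + 1].isdigit():
--             return True
--
--     # Verifica abreviações comuns
--     abbrevs = ['dr', 'sr', 'sra', 'jr', 'etc', 'ex', 'fig', 'pág', 'vol', 'cap', 'art', 'nº', 'n°']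
--     for abbrev in abbrevs:
--         start = dot_pos - len(abbrev)
--         if start >= 0:
--             word = text[start:dot_pos].lower()
--             if word == abbrev:
--                 return True
--
--     return False
-- ===== SOURCE B (Python) =====
-- # Reversed-suffix trie: walk characters backwards from the dot through a
-- # character automaton instead of comparing slices against each abbreviation.
-- # '' key marks an accepting node (a complete reversed abbreviation).
-- _TRIE = {
--     'r': {'d': {'': True}, 's': {'': True}, 'j': {'': True}},
--     'a': {'r': {'s': {'': True}}},
--     'c': {'t': {'e': {'': True}}},
--     'x': {'e': {'': True}},
--     'g': {'i': {'f': {'': True}}, 'á': {'p': {'': True}}},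
--     'l': {'o': {'v': {'': True}}},
--     'p': {'a': {'c': {'': True}}},
--     't': {'r': {'a': {'': True}}},
--     'º': {'n': {'': True}},
--     '°': {'n': {'': True}},
-- }
--
-- def _is_number_or_abbrev(text: str, dot_pos: int) -> bool:
--     if dot_pos <= 0:
--         return False
--     if text[dot_pos - 1].isdigit() and dot_pos + 1 < len(text) and text[dot_pos + 1].isdigit():
--         return True
--     node = _TRIE
--     for ch in reversed(text[:dot_pos]):
--         node = node.get(ch.lower())
--         if node is None:
--             return False
--         if '' in node:
--             return True
--     return False
-- ===== Notes on version B (the rewrite author's own statement) =====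
-- stated objective: alternative
-- what changed: A's loop over 13 abbreviations, slicing and comparing the text once per abbreviation, is replaced by a single backward character walk from the dot through a reversed-suffix trie (a character automaton), so the text before the dot is read at most once, character by character, with no slicing and no per-abbreviation comparisons; the decimal guard is flattened and a dot at position <= 0 returns early.
import Mathlib
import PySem

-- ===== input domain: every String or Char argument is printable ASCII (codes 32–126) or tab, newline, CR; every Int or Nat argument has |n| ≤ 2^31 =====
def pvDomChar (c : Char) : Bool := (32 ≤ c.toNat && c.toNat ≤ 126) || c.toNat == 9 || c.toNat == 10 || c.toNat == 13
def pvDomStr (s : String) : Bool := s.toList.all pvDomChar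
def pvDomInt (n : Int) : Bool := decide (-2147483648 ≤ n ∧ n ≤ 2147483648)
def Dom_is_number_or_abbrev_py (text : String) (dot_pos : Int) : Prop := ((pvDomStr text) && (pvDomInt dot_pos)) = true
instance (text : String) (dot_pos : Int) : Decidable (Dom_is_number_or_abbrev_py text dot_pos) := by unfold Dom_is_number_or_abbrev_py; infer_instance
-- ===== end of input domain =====

-- B replaces A's 13-abbreviation slice-comparison loop by a backward character walk through a
-- reversed-suffix trie (a character automaton); objective: alternative algorithm, not claimed faster.

-- ===== PORT A =====
-- text[i].isdigit(); the getD false default is only reached where Python raises (excluded by Pre_)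
def pvDigitAt (text : String) (i : Int) : Bool :=
  ((PySem.Str.pyGet? text i).map PySem.Chars.isdigit).getD false

-- the 'for abbrev in abbrevs' loop with early return
def pvAbbrevLoop (text : String) (dot_pos : Int) : List String → Bool
  | [] => false
  | a :: rest =>
    let start := dot_pos - (PySem.Str.len a : Int)
    if 0 ≤ start then
      if PySem.Str.lower (PySem.Str.slice text (some start) (some dot_pos)) = a then true
      else pvAbbrevLoop text dot_pos rest
    else pvAbbrevLoop text dot_pos rest

def is_number_or_abbrev_py (text : String) (dot_pos : Int) : Bool :=
  if dot_pos > 0 ∧ pvDigitAt text (dot_pos - 1) then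
    if dot_pos + 1 < (PySem.Str.len text : Int) ∧ pvDigitAt text (dot_pos + 1) then true
    else pvAbbrevLoop text dot_pos
      ["dr", "sr", "sra", "jr", "etc", "ex", "fig", "pág", "vol", "cap", "art", "nº", "n°"]
  else pvAbbrevLoop text dot_pos
    ["dr", "sr", "sra", "jr", "etc", "ex", "fig", "pág", "vol", "cap", "art", "nº", "n°"]

-- ===== PORT B =====
-- the reversed-abbreviation trie of Source B: a node carries its accept mark ('' key) and its children
mutual
inductive PvTrie where
  | node : Bool → PvKids → PvTrie
inductive PvKids where
  | nil : PvKids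
  | cons : Char → PvTrie → PvKids → PvKids
end

-- node.get(ch): first (only) matching child
def pvKidsGet : PvKids → Char → Option PvTrie
  | .nil, _ => none
  | .cons c t rest, ch => if ch = c then some t else pvKidsGet rest ch

-- the literal _TRIE of Source B (root is its children map)
def pvTrie : PvKids :=
  .cons 'r' (.node false (.cons 'd' (.node true .nil) (.cons 's' (.node true .nil) (.cons 'j' (.node true .nil) .nil))))
  (.cons 'a' (.node false (.cons 'r' (.node false (.cons 's' (.node true .nil) .nil)) .nil))
  (.cons 'c' (.node false (.cons 't' (.node false (.cons 'e' (.node true .nil) .nil)) .nil))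
  (.cons 'x' (.node false (.cons 'e' (.node true .nil) .nil))
  (.cons 'g' (.node false (.cons 'i' (.node false (.cons 'f' (.node true .nil) .nil)) (.cons 'á' (.node false (.cons 'p' (.node true .nil) .nil)) .nil)))
  (.cons 'l' (.node false (.cons 'o' (.node false (.cons 'v' (.node true .nil) .nil)) .nil))
  (.cons 'p' (.node false (.cons 'a' (.node false (.cons 'c' (.node true .nil) .nil)) .nil))
  (.cons 't' (.node false (.cons 'r' (.node false (.cons 'a' (.node true .nil) .nil)) .nil))
  (.cons 'º' (.node false (.cons 'n' (.node true .nil) .nil))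
  (.cons '°' (.node false (.cons 'n' (.node true .nil) .nil)) .nil)))))))))

-- the 'for ch in reversed(text[:dot_pos])' walk with early returns
def pvWalk (kids : PvKids) : List Char → Bool
  | [] => false
  | ch :: rest =>
    match pvKidsGet kids (PySem.Chars.lowerChar ch) with
    | none => false
    | some (.node acc kids') => if acc then true else pvWalk kids' rest

def is_number_or_abbrev_py_alt (text : String) (dot_pos : Int) : Bool :=
  if dot_pos ≤ 0 then false
  else if pvDigitAt text (dot_pos - 1) ∧ dot_pos + 1 < (PySem.Str.len text : Int) ∧ pvDigitAt text (dot_pos + 1) then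
    true
  else pvWalk pvTrie (PySem.Str.slice text none (some dot_pos)).toList.reverse

-- ===== PRECONDITION & SPEC =====
-- Pre_ excludes exactly the inputs where Python A raises IndexError: dot_pos > 0 with dot_pos - 1 past the end of text.
def Pre_is_number_or_abbrev_py (text : String) (dot_pos : Int) : Prop :=
  dot_pos ≤ (PySem.Str.len text : Int)
instance (text : String) (dot_pos : Int) : Decidable (Pre_is_number_or_abbrev_py text dot_pos) := by unfold Pre_is_number_or_abbrev_py; infer_instance
def pvWitness_is_number_or_abbrev_py : String × Int := ("dr. Silva", 2)

def Spec_is_number_or_abbrev_py (text : String) (dot_pos : Int) (out : Bool) : Prop := out = is_number_or_abbrev_py_alt text dot_pos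
instance (text : String) (dot_pos : Int) (out : Bool) : Decidable (Spec_is_number_or_abbrev_py text dot_pos out) := by unfold Spec_is_number_or_abbrev_py; infer_instance

-- ===== CLAIM (what is proved, stated in full; the proofs are below) =====
def Claim_equal_is_number_or_abbrev_py : Prop := ∀ (text : String) (dot_pos : Int), Dom_is_number_or_abbrev_py text dot_pos → Pre_is_number_or_abbrev_py text dot_pos → Spec_is_number_or_abbrev_py text dot_pos (is_number_or_abbrev_py text dot_pos)

-- ===== LEMMAS AND PROOFS =====
-- the lowered suffix slice of length L, as A compares it
def pvLowSlice (t : String) (p : Int) (L : Nat) : String :=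
  PySem.Str.lower (PySem.Str.slice t (some (p - L)) (some p))

theorem pvAbbrevLoop_nil_iff (t : String) (p : Int) : pvAbbrevLoop t p [] = true ↔ False := by
  simp [pvAbbrevLoop]

theorem pvAbbrevLoop_cons_iff (t : String) (p : Int) (a : String) (rest : List String) :
    pvAbbrevLoop t p (a :: rest) = true ↔
      (0 ≤ p - (PySem.Str.len a : Int) ∧
        PySem.Str.lower (PySem.Str.slice t (some (p - (PySem.Str.len a : Int))) (some p)) = a) ∨
      pvAbbrevLoop t p rest = true := by
  simp only [pvAbbrevLoop]
  split_ifs <;> simp_all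

-- A's scan, grouped by abbreviation length
theorem pvAbbrevLoop_iff (t : String) (p : Int) :
    (pvAbbrevLoop t p ["dr", "sr", "sra", "jr", "etc", "ex", "fig", "pág", "vol", "cap", "art", "nº", "n°"] = true) ↔
    (0 ≤ p - 2 ∧ (pvLowSlice t p 2 = "dr" ∨ pvLowSlice t p 2 = "sr" ∨ pvLowSlice t p 2 = "jr" ∨
                  pvLowSlice t p 2 = "ex" ∨ pvLowSlice t p 2 = "nº" ∨ pvLowSlice t p 2 = "n°")) ∨
    (0 ≤ p - 3 ∧ (pvLowSlice t p 3 = "sra" ∨ pvLowSlice t p 3 = "etc" ∨ pvLowSlice t p 3 = "fig" ∨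
                  pvLowSlice t p 3 = "pág" ∨ pvLowSlice t p 3 = "vol" ∨ pvLowSlice t p 3 = "cap" ∨
                  pvLowSlice t p 3 = "art")) := by
  have l2d : (PySem.Str.len "dr" : Int) = 2 := by decide
  have l2s : (PySem.Str.len "sr" : Int) = 2 := by decide
  have l3sra : (PySem.Str.len "sra" : Int) = 3 := by decide
  have l2j : (PySem.Str.len "jr" : Int) = 2 := by decide
  have l3etc : (PySem.Str.len "etc" : Int) = 3 := by decide
  have l2e : (PySem.Str.len "ex" : Int) = 2 := by decide
  have l3fig : (PySem.Str.len "fig" : Int) = 3 := by decide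
  have l3pag : (PySem.Str.len "pág" : Int) = 3 := by decide
  have l3vol : (PySem.Str.len "vol" : Int) = 3 := by decide
  have l3cap : (PySem.Str.len "cap" : Int) = 3 := by decide
  have l3art : (PySem.Str.len "art" : Int) = 3 := by decide
  have l2no : (PySem.Str.len "nº" : Int) = 2 := by decide
  have l2nd : (PySem.Str.len "n°" : Int) = 2 := by decide
  simp only [pvAbbrevLoop_cons_iff, pvAbbrevLoop_nil_iff, l2d, l2s, l3sra, l2j, l3etc, l2e,
    l3fig, l3pag, l3vol, l3cap, l3art, l2no, l2nd, pvLowSlice, or_false]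
  constructor
  · rintro (⟨g,e⟩|⟨g,e⟩|⟨g,e⟩|⟨g,e⟩|⟨g,e⟩|⟨g,e⟩|⟨g,e⟩|⟨g,e⟩|⟨g,e⟩|⟨g,e⟩|⟨g,e⟩|⟨g,e⟩|⟨g,e⟩)
    · exact Or.inl ⟨g, Or.inl e⟩
    · exact Or.inl ⟨g, Or.inr (Or.inl e)⟩
    · exact Or.inr ⟨g, Or.inl e⟩
    · exact Or.inl ⟨g, Or.inr (Or.inr (Or.inl e))⟩
    · exact Or.inr ⟨g, Or.inr (Or.inl e)⟩
    · exact Or.inl ⟨g, Or.inr (Or.inr (Or.inr (Or.inl e)))⟩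
    · exact Or.inr ⟨g, Or.inr (Or.inr (Or.inl e))⟩
    · exact Or.inr ⟨g, Or.inr (Or.inr (Or.inr (Or.inl e)))⟩
    · exact Or.inr ⟨g, Or.inr (Or.inr (Or.inr (Or.inr (Or.inl e))))⟩
    · exact Or.inr ⟨g, Or.inr (Or.inr (Or.inr (Or.inr (Or.inr (Or.inl e)))))⟩
    · exact Or.inr ⟨g, Or.inr (Or.inr (Or.inr (Or.inr (Or.inr (Or.inr e)))))⟩
    · exact Or.inl ⟨g, Or.inr (Or.inr (Or.inr (Or.inr (Or.inl e))))⟩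
    · exact Or.inl ⟨g, Or.inr (Or.inr (Or.inr (Or.inr (Or.inr e))))⟩
  · rintro (⟨g, (e|e|e|e|e|e)⟩|⟨g, (e|e|e|e|e|e|e)⟩)
    · exact Or.inl ⟨g, e⟩
    · exact Or.inr (Or.inl ⟨g, e⟩)
    · exact Or.inr (Or.inr (Or.inr (Or.inl ⟨g, e⟩)))
    · exact Or.inr (Or.inr (Or.inr (Or.inr (Or.inr (Or.inl ⟨g, e⟩)))))
    · exact Or.inr (Or.inr (Or.inr (Or.inr (Or.inr (Or.inr (Or.inr (Or.inr (Or.inr (Or.inr (Or.inr (Or.inl ⟨g, e⟩)))))))))))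
    · exact Or.inr (Or.inr (Or.inr (Or.inr (Or.inr (Or.inr (Or.inr (Or.inr (Or.inr (Or.inr (Or.inr (Or.inr ⟨g, e⟩)))))))))))
    · exact Or.inr (Or.inr (Or.inl ⟨g, e⟩))
    · exact Or.inr (Or.inr (Or.inr (Or.inr (Or.inl ⟨g, e⟩))))
    · exact Or.inr (Or.inr (Or.inr (Or.inr (Or.inr (Or.inr (Or.inl ⟨g, e⟩))))))
    · exact Or.inr (Or.inr (Or.inr (Or.inr (Or.inr (Or.inr (Or.inr (Or.inl ⟨g, e⟩)))))))
    · exact Or.inr (Or.inr (Or.inr (Or.inr (Or.inr (Or.inr (Or.inr (Or.inr (Or.inl ⟨g, e⟩))))))))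
    · exact Or.inr (Or.inr (Or.inr (Or.inr (Or.inr (Or.inr (Or.inr (Or.inr (Or.inr (Or.inl ⟨g, e⟩)))))))))
    · exact Or.inr (Or.inr (Or.inr (Or.inr (Or.inr (Or.inr (Or.inr (Or.inr (Or.inr (Or.inr (Or.inl ⟨g, e⟩))))))))))

-- what A's slice compares, written over the reversed prefix B walks
theorem pvLowSlice_toList (t : String) (p : Int) (L : Nat) (hL : (L : Int) ≤ p)
    (hp : p ≤ (PySem.Str.len t : Int)) :
    (pvLowSlice t p L).toList =
      ((t.toList.take p.toNat).reverse.take L).reverse.map PySem.Chars.lowerChar := by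
  have hlen : p.toNat ≤ t.toList.length := by have := PySem.Str.len_eq t; omega
  unfold pvLowSlice
  simp only [PySem.Str.toList_lower, PySem.Str.toList_slice, PySem.Chars.slice_eq_listSlice]
  rw [PySem.List.slice_toNat _ (by omega) (by omega)]
  rw [List.take_reverse, List.reverse_reverse, List.length_take, Nat.min_eq_left hlen,
    List.drop_take]
  have h1 : (p - L).toNat = p.toNat - L := by omega
  have h2 : p.toNat - (p.toNat - L) = L := by omega
  rw [h1, h2]
  rfl

theorem pvWalk_nil (l : List Char) : pvWalk .nil l = false := by
  cases l <;> simp [pvWalk, pvKidsGet]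

-- the walk dies on a single character (no 1-letter abbreviation)
theorem pvWalk_one (a : Char) : pvWalk pvTrie [a] = false := by
  simp only [pvWalk, pvTrie, pvKidsGet]
  split_ifs <;> simp_all [pvKidsGet]

theorem pvWalk_two (x y : Char) : (pvWalk pvTrie [x, y] = true) ↔
    ((PySem.Chars.lowerChar x = 'r' ∧ (PySem.Chars.lowerChar y = 'd' ∨ PySem.Chars.lowerChar y = 's' ∨ PySem.Chars.lowerChar y = 'j')) ∨
     (PySem.Chars.lowerChar x = 'x' ∧ PySem.Chars.lowerChar y = 'e') ∨
     (PySem.Chars.lowerChar x = 'º' ∧ PySem.Chars.lowerChar y = 'n') ∨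
     (PySem.Chars.lowerChar x = '°' ∧ PySem.Chars.lowerChar y = 'n')) := by
  simp only [pvWalk, pvTrie, pvKidsGet]
  split_ifs <;> simp_all [pvKidsGet, pvWalk_nil] <;> (try split_ifs <;> simp_all [pvKidsGet, pvWalk_nil])

theorem pvWalk_three (x y z : Char) (rest : List Char) :
    (pvWalk pvTrie (x :: y :: z :: rest) = true) ↔
    ((PySem.Chars.lowerChar x = 'r' ∧ (PySem.Chars.lowerChar y = 'd' ∨ PySem.Chars.lowerChar y = 's' ∨ PySem.Chars.lowerChar y = 'j')) ∨
     (PySem.Chars.lowerChar x = 'x' ∧ PySem.Chars.lowerChar y = 'e') ∨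
     (PySem.Chars.lowerChar x = 'º' ∧ PySem.Chars.lowerChar y = 'n') ∨
     (PySem.Chars.lowerChar x = '°' ∧ PySem.Chars.lowerChar y = 'n') ∨
     (PySem.Chars.lowerChar x = 'a' ∧ PySem.Chars.lowerChar y = 'r' ∧ PySem.Chars.lowerChar z = 's') ∨
     (PySem.Chars.lowerChar x = 'c' ∧ PySem.Chars.lowerChar y = 't' ∧ PySem.Chars.lowerChar z = 'e') ∨
     (PySem.Chars.lowerChar x = 'g' ∧ PySem.Chars.lowerChar y = 'i' ∧ PySem.Chars.lowerChar z = 'f') ∨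
     (PySem.Chars.lowerChar x = 'g' ∧ PySem.Chars.lowerChar y = 'á' ∧ PySem.Chars.lowerChar z = 'p') ∨
     (PySem.Chars.lowerChar x = 'l' ∧ PySem.Chars.lowerChar y = 'o' ∧ PySem.Chars.lowerChar z = 'v') ∨
     (PySem.Chars.lowerChar x = 'p' ∧ PySem.Chars.lowerChar y = 'a' ∧ PySem.Chars.lowerChar z = 'c') ∨
     (PySem.Chars.lowerChar x = 't' ∧ PySem.Chars.lowerChar y = 'r' ∧ PySem.Chars.lowerChar z = 'a')) := by
  simp only [pvWalk, pvTrie, pvKidsGet]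
  split_ifs <;> simp_all [pvKidsGet, pvWalk_nil] <;> (try split_ifs <;> simp_all [pvKidsGet, pvWalk_nil]) <;> (try split_ifs <;> simp_all [pvKidsGet, pvWalk_nil])

-- A's abbreviation scan and B's trie walk agree on every admitted prefix
theorem pvLoop_eq_walk (t : String) (p : Int) (h0 : 0 < p) (hp : p ≤ (PySem.Str.len t : Int)) :
    pvAbbrevLoop t p ["dr", "sr", "sra", "jr", "etc", "ex", "fig", "pág", "vol", "cap", "art", "nº", "n°"]
      = pvWalk pvTrie (PySem.Str.slice t none (some p)).toList.reverse := by
  have hlen : p.toNat ≤ t.toList.length := by have := PySem.Str.len_eq t; omega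
  have hstr : t.length = t.toList.length := rfl
  have hslice : (PySem.Str.slice t none (some p)).toList = t.toList.take p.toNat := by
    simp only [PySem.Str.toList_slice, PySem.Chars.slice_eq_listSlice]
    exact PySem.List.slice_to _ (le_of_lt h0)
  rw [hslice]
  refine Bool.coe_iff_coe.mp ?_
  show _ = true ↔ _ = true
  rw [pvAbbrevLoop_iff]
  have hulen : (t.toList.take p.toNat).reverse.length = p.toNat := by
    simp [List.length_take]; omega
  rcases hrev : (t.toList.take p.toNat).reverse with _ | ⟨a, tl⟩
  · rw [hrev] at hulen; simp at hulen; omega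
  · rcases tl with _ | ⟨b, tl2⟩
    · -- exactly one character before the dot: nothing matches on either side
      rw [hrev] at hulen; simp at hulen
      rw [pvWalk_one]
      simp only [Bool.false_eq_true, iff_false]
      rintro (⟨g, _⟩ | ⟨g, _⟩) <;> omega
    · have hsl2 : (pvLowSlice t p 2).toList =
          [PySem.Chars.lowerChar b, PySem.Chars.lowerChar a] := by
        rw [pvLowSlice_toList t p 2 (by rw [hrev] at hulen; simp at hulen; omega) hp, hrev]
        rfl
      have e2 : ∀ w : String, (pvLowSlice t p 2 = w) ↔
          ([PySem.Chars.lowerChar b, PySem.Chars.lowerChar a] = w.toList) := by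
        intro w; rw [String.ext_iff, hsl2]
      rcases tl2 with _ | ⟨c, rest⟩
      · -- exactly two characters before the dot
        rw [hrev] at hulen; simp at hulen
        rw [pvWalk_two]
        simp only [e2, show ("dr" : String).toList = ['d','r'] from rfl,
          show ("sr" : String).toList = ['s','r'] from rfl,
          show ("jr" : String).toList = ['j','r'] from rfl,
          show ("ex" : String).toList = ['e','x'] from rfl,
          show ("nº" : String).toList = ['n','º'] from rfl,
          show ("n°" : String).toList = ['n','°'] from rfl,
          List.cons.injEq, and_true]
        constructor
        · rintro (⟨-, (⟨e,f⟩|⟨e,f⟩|⟨e,f⟩|⟨e,f⟩|⟨e,f⟩|⟨e,f⟩)⟩ | ⟨g, -⟩)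
          · exact Or.inl ⟨f, Or.inl e⟩
          · exact Or.inl ⟨f, Or.inr (Or.inl e)⟩
          · exact Or.inl ⟨f, Or.inr (Or.inr e)⟩
          · exact Or.inr (Or.inl ⟨f, e⟩)
          · exact Or.inr (Or.inr (Or.inl ⟨f, e⟩))
          · exact Or.inr (Or.inr (Or.inr ⟨f, e⟩))
          · omega
        · have g2 : (0:Int) ≤ p - 2 := by omega
          rintro (⟨f, (e|e|e)⟩ | ⟨f, e⟩ | ⟨f, e⟩ | ⟨f, e⟩)
          · exact Or.inl ⟨g2, Or.inl ⟨e, f⟩⟩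
          · exact Or.inl ⟨g2, Or.inr (Or.inl ⟨e, f⟩)⟩
          · exact Or.inl ⟨g2, Or.inr (Or.inr (Or.inl ⟨e, f⟩))⟩
          · exact Or.inl ⟨g2, Or.inr (Or.inr (Or.inr (Or.inl ⟨e, f⟩)))⟩
          · exact Or.inl ⟨g2, Or.inr (Or.inr (Or.inr (Or.inr (Or.inl ⟨e, f⟩))))⟩
          · exact Or.inl ⟨g2, Or.inr (Or.inr (Or.inr (Or.inr (Or.inr ⟨e, f⟩))))⟩
      · -- three or more characters before the dot
        have h3 : 3 ≤ p.toNat := by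
          rw [hrev] at hulen; simp at hulen; omega
        have hsl3 : (pvLowSlice t p 3).toList =
            [PySem.Chars.lowerChar c, PySem.Chars.lowerChar b, PySem.Chars.lowerChar a] := by
          rw [pvLowSlice_toList t p 3 (by omega) hp, hrev]
          rfl
        have e3 : ∀ w : String, (pvLowSlice t p 3 = w) ↔
            ([PySem.Chars.lowerChar c, PySem.Chars.lowerChar b, PySem.Chars.lowerChar a] = w.toList) := by
          intro w; rw [String.ext_iff, hsl3]
        rw [pvWalk_three]
        simp only [e2, e3, show ("dr" : String).toList = ['d','r'] from rfl,
          show ("sr" : String).toList = ['s','r'] from rfl,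
          show ("jr" : String).toList = ['j','r'] from rfl,
          show ("ex" : String).toList = ['e','x'] from rfl,
          show ("nº" : String).toList = ['n','º'] from rfl,
          show ("n°" : String).toList = ['n','°'] from rfl,
          show ("sra" : String).toList = ['s','r','a'] from rfl,
          show ("etc" : String).toList = ['e','t','c'] from rfl,
          show ("fig" : String).toList = ['f','i','g'] from rfl,
          show ("pág" : String).toList = ['p','á','g'] from rfl,
          show ("vol" : String).toList = ['v','o','l'] from rfl,
          show ("cap" : String).toList = ['c','a','p'] from rfl,
          show ("art" : String).toList = ['a','r','t'] from rfl,
          List.cons.injEq, and_true]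
        constructor
        · rintro (⟨-, (⟨e,f⟩|⟨e,f⟩|⟨e,f⟩|⟨e,f⟩|⟨e,f⟩|⟨e,f⟩)⟩ |
                  ⟨-, (⟨e,f,g⟩|⟨e,f,g⟩|⟨e,f,g⟩|⟨e,f,g⟩|⟨e,f,g⟩|⟨e,f,g⟩|⟨e,f,g⟩)⟩)
          · exact Or.inl ⟨f, Or.inl e⟩
          · exact Or.inl ⟨f, Or.inr (Or.inl e)⟩
          · exact Or.inl ⟨f, Or.inr (Or.inr e)⟩
          · exact Or.inr (Or.inl ⟨f, e⟩)
          · exact Or.inr (Or.inr (Or.inl ⟨f, e⟩))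
          · exact Or.inr (Or.inr (Or.inr (Or.inl ⟨f, e⟩)))
          · exact Or.inr (Or.inr (Or.inr (Or.inr (Or.inl ⟨g, f, e⟩))))
          · exact Or.inr (Or.inr (Or.inr (Or.inr (Or.inr (Or.inl ⟨g, f, e⟩)))))
          · exact Or.inr (Or.inr (Or.inr (Or.inr (Or.inr (Or.inr (Or.inl ⟨g, f, e⟩))))))
          · exact Or.inr (Or.inr (Or.inr (Or.inr (Or.inr (Or.inr (Or.inr (Or.inl ⟨g, f, e⟩)))))))
          · exact Or.inr (Or.inr (Or.inr (Or.inr (Or.inr (Or.inr (Or.inr (Or.inr (Or.inl ⟨g, f, e⟩))))))))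
          · exact Or.inr (Or.inr (Or.inr (Or.inr (Or.inr (Or.inr (Or.inr (Or.inr (Or.inr (Or.inl ⟨g, f, e⟩)))))))))
          · exact Or.inr (Or.inr (Or.inr (Or.inr (Or.inr (Or.inr (Or.inr (Or.inr (Or.inr (Or.inr ⟨g, f, e⟩)))))))))
        · have g2 : (0:Int) ≤ p - 2 := by omega
          have g3 : (0:Int) ≤ p - 3 := by omega
          rintro (⟨f, (e|e|e)⟩ | ⟨f, e⟩ | ⟨f, e⟩ | ⟨f, e⟩ |
                  ⟨f, e, g⟩ | ⟨f, e, g⟩ | ⟨f, e, g⟩ | ⟨f, e, g⟩ | ⟨f, e, g⟩ | ⟨f, e, g⟩ | ⟨f, e, g⟩)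
          · exact Or.inl ⟨g2, Or.inl ⟨e, f⟩⟩
          · exact Or.inl ⟨g2, Or.inr (Or.inl ⟨e, f⟩)⟩
          · exact Or.inl ⟨g2, Or.inr (Or.inr (Or.inl ⟨e, f⟩))⟩
          · exact Or.inl ⟨g2, Or.inr (Or.inr (Or.inr (Or.inl ⟨e, f⟩)))⟩
          · exact Or.inl ⟨g2, Or.inr (Or.inr (Or.inr (Or.inr (Or.inl ⟨e, f⟩))))⟩
          · exact Or.inl ⟨g2, Or.inr (Or.inr (Or.inr (Or.inr (Or.inr ⟨e, f⟩))))⟩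
          · exact Or.inr ⟨g3, Or.inl ⟨g, e, f⟩⟩
          · exact Or.inr ⟨g3, Or.inr (Or.inl ⟨g, e, f⟩)⟩
          · exact Or.inr ⟨g3, Or.inr (Or.inr (Or.inl ⟨g, e, f⟩))⟩
          · exact Or.inr ⟨g3, Or.inr (Or.inr (Or.inr (Or.inl ⟨g, e, f⟩)))⟩
          · exact Or.inr ⟨g3, Or.inr (Or.inr (Or.inr (Or.inr (Or.inl ⟨g, e, f⟩))))⟩
          · exact Or.inr ⟨g3, Or.inr (Or.inr (Or.inr (Or.inr (Or.inr (Or.inl ⟨g, e, f⟩)))))⟩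
          · exact Or.inr ⟨g3, Or.inr (Or.inr (Or.inr (Or.inr (Or.inr (Or.inr ⟨g, e, f⟩)))))⟩

-- A's scan finds nothing when the dot has no characters before it
theorem pvLoop_false_of_nonpos (t : String) (p : Int) (h0 : p ≤ 0) :
    pvAbbrevLoop t p ["dr", "sr", "sra", "jr", "etc", "ex", "fig", "pág", "vol", "cap", "art", "nº", "n°"] = false := by
  rw [← Bool.not_eq_true, pvAbbrevLoop_iff]
  rintro (⟨g, _⟩ | ⟨g, _⟩) <;> omega

-- ===== VERDICT (by name: the statement is the Claim_ definition above) =====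
theorem is_number_or_abbrev_py_spec : Claim_equal_is_number_or_abbrev_py := by
  intro text p _ hpre
  unfold Spec_is_number_or_abbrev_py is_number_or_abbrev_py is_number_or_abbrev_py_alt
  unfold Pre_is_number_or_abbrev_py at hpre
  by_cases h0 : p ≤ 0
  · rw [if_pos h0, if_neg (by rintro ⟨h, -⟩; omega)]
    exact pvLoop_false_of_nonpos text p h0
  · rw [if_neg h0]
    have h0' : 0 < p := by omega
    clear h0
    by_cases hd : pvDigitAt text (p - 1) = true
    · rw [if_pos ⟨h0', hd⟩]
      by_cases hin : p + 1 < (PySem.Str.len text : Int) ∧ pvDigitAt text (p + 1) = true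
      · rw [if_pos hin, if_pos ⟨hd, hin.1, hin.2⟩]
      · rw [if_neg hin, if_neg (by rintro ⟨-, h1, h2⟩; exact hin ⟨h1, h2⟩)]
        exact pvLoop_eq_walk text p h0' hpre
    · rw [if_neg (by rintro ⟨-, h⟩; exact hd h), if_neg (by rintro ⟨h, -⟩; exact hd h)]
      exact pvLoop_eq_walk text p h0' hpre
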